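-- pv_equiv track=rewrite | github.com/iamabhi6345/DSA | dp_leetcode/1_linear_dp/20_partition_dp_partition_array_for_maximum_sum.py | maxSumAfterPartitioning
-- ===== SOURCE A (Python) =====
-- from typing import List
--
-- def maxSumAfterPartitioning(arr: List[int], k: int) -> int:
--     n= len(arr)
--     dp=[0]*(n+1)
--
--     for i in range(n-1,-1,-1):
--         length =0
--         maxi = int(-1e8)
--         ans = int(-1e8)
--         for j in range(i , min(i+k , n)):
--             length+=1
--             maxi = max(maxi , arr[j])
--             cost = length*maxi + dp[j+1]
--             ans = max(ans,cost)
--         dp[i] = ans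
--     return dp[0]
-- ===== SOURCE B (Python) =====
-- def maxSumAfterPartitioning(arr, k):
--     # Top-down memoized recursion best(i) = max sum obtainable from arr[i:]
--     # (base case best(n) = 0), evaluated demand-first on an explicit work
--     # stack instead of call recursion; results cached in a dict by index.
--     n = len(arr)
--     memo = {n: 0}
--     stack = [0]
--     while stack:
--         i = stack.pop()
--         if i in memo:
--             continue
--         if (i + 1) not in memo:
--             stack.append(i)
--             stack.append(i + 1)
--             continue
--         runmax = arr[i]
--         best = runmax + memo[i + 1]
--         for j in range(i + 1, min(i + k, n)):
--             if arr[j] > runmax: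
--                 runmax = arr[j]
--             c = (j - i + 1) * runmax + memo[j + 1]
--             if c > best:
--                 best = c
--         memo[i] = best
--     return memo[0]
-- ===== Notes on version B (the rewrite author's own statement) =====
-- stated objective: alternative
-- what changed: Replaces A's backward index loop that fills a dp array seeded with -1e8 sentinels by the top-down memoized recursion best(i)=max sum of arr[i:], run demand-first on an explicit work stack with a dict cache and a sentinel-free inner scan seeded from the mandatory length-1 block.
-- outside the precondition, e.g. on maxSumAfterPartitioning([-200000000], 1): A returns -100000000, B returns -200000000; on maxSumAfterPartitioning([1], 0): A returns -100000000, B returns 1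
import Mathlib
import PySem

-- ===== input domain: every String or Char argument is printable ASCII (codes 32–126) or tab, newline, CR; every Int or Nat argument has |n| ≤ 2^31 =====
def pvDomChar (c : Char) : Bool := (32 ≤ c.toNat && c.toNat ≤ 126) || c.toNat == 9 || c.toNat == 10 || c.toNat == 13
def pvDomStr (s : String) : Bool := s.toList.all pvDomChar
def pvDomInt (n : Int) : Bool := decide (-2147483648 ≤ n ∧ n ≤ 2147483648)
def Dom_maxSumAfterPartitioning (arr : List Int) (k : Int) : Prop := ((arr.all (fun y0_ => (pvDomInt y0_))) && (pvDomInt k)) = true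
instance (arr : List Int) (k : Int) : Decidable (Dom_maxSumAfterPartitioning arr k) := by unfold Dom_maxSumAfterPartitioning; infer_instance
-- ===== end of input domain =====

-- B replaces A's backward sentinel-seeded dp-array loop by the top-down memoized recursion
-- best(i) run demand-first on an explicit work stack with a dict cache; equivalence is proved
-- on Pre_ (k >= 1 or arr = [], total negative magnitude <= 10^8).


-- ===== PORT A =====
def maxSumAfterPartitioning (arr : List Int) (k : Int) : Int :=
  let n : Int := arr.length
  let dp0 : List Int := List.replicate (n.toNat + 1) 0
  let dp := (PySem.List.pyRange (n - 1) (-1) (-1)).foldl (fun dp i =>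
    let st := (PySem.List.pyRange i (min (i + k) n) 1).foldl
      (fun (st : Int × Int × Int) j =>
        let length := st.1 + 1
        let maxi := max st.2.1 (PySem.List.pyGetD arr j 0)
        let cost := length * maxi + PySem.List.pyGetD dp (j + 1) 0
        (length, maxi, max st.2.2 cost))
      (0, -100000000, -100000000)
    dp.set i.toNat st.2.2) dp0
  PySem.List.pyGetD dp 0 0

-- ===== PORT B =====
-- the while loop of Source B, with fuel 2*n+1 (proved sufficient below) making it structurally
-- total; memo[x] accesses are ported as getD (the key is always present when accessed).
def bLoop (arr : List Int) (k n : Int) : Nat → List Int → PySem.Dict Int Int → PySem.Dict Int Int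
  | 0, _, memo => memo
  | _ + 1, [], memo => memo
  | fuel + 1, i :: rest, memo =>
    if memo.contains i then bLoop arr k n fuel rest memo
    else if memo.contains (i + 1) = false then bLoop arr k n fuel ((i + 1) :: i :: rest) memo
    else
      let runmax0 := PySem.List.pyGetD arr i 0
      let best0 := runmax0 + memo.getD (i + 1) 0
      let st := (PySem.List.pyRange (i + 1) (min (i + k) n) 1).foldl
        (fun (s : Int × Int) j =>
          let v := PySem.List.pyGetD arr j 0
          let runmax := if v > s.1 then v else s.1
          let c := (j - i + 1) * runmax + memo.getD (j + 1) 0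
          (runmax, if c > s.2 then c else s.2))
        (runmax0, best0)
      bLoop arr k n fuel rest (memo.insert i st.2)

def maxSumAfterPartitioning_alt (arr : List Int) (k : Int) : Int :=
  let n : Int := arr.length
  let memo := bLoop arr k n (2 * arr.length + 1) [0] (PySem.Dict.empty.insert n 0)
  memo.getD 0 0

-- ===== PRECONDITION & SPEC =====
-- Pre_ excludes k ≤ 0 on nonempty input (A returns the bare -1e8 sentinel there while B returns
-- the sum of length-1 blocks) and inputs whose summed negative magnitude Σ max(0,-x) exceeds
-- 10^8 (on those A still returns, but its int(-1e8) sentinel can clamp block maxima / answers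
-- to -100000000, a value B's sentinel-free algorithm cannot match).
def Pre_maxSumAfterPartitioning (arr : List Int) (k : Int) : Prop :=
  (1 ≤ k ∨ arr = []) ∧ (arr.map (fun x => max 0 (-x))).sum ≤ 100000000
instance (arr : List Int) (k : Int) : Decidable (Pre_maxSumAfterPartitioning arr k) := by
  unfold Pre_maxSumAfterPartitioning; infer_instance
def pvWitness_maxSumAfterPartitioning : List Int × Int := ([1, -2, 3, 4], 3)
def Spec_maxSumAfterPartitioning (arr : List Int) (k : Int) (out : Int) : Prop := out = maxSumAfterPartitioning_alt arr k
instance (arr : List Int) (k : Int) (out : Int) : Decidable (Spec_maxSumAfterPartitioning arr k out) := by unfold Spec_maxSumAfterPartitioning; infer_instance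

-- ===== CLAIM (what is proved, stated in full; the proofs are below) =====
def Claim_equal_maxSumAfterPartitioning : Prop := ∀ (arr : List Int) (k : Int), Dom_maxSumAfterPartitioning arr k → Pre_maxSumAfterPartitioning arr k → Spec_maxSumAfterPartitioning arr k (maxSumAfterPartitioning arr k)

-- ===== LEMMAS AND PROOFS =====

-- Reference recurrence (sentinel-free): pvBest k l = best sum for suffix l.
mutual
def pvBest (k : Int) : List Int → Int
  | [] => 0
  | x :: t => pvGo k x 1 t
  termination_by l => 2 * l.length
def pvGo (k maxi len : Int) (t : List Int) : Int :=
  let c := len * maxi + pvBest k t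
  match t with
  | [] => c
  | y :: t2 => if len < k then max c (pvGo k (max maxi y) (len + 1) t2) else c
  termination_by 2 * t.length + 1
end

-- A's clamped recurrence (with the -1e8 sentinels).
mutual
def pvBestA (k : Int) : List Int → Int
  | [] => 0
  | x :: t => pvGoA k (max (-100000000) x) 1 (-100000000) t
  termination_by l => 2 * l.length
def pvGoA (k maxi len ans : Int) (t : List Int) : Int :=
  let a := max ans (len * maxi + pvBestA k t)
  match t with
  | [] => a
  | y :: t2 => if len < k then pvGoA k (max maxi y) (len + 1) a t2 else a
  termination_by 2 * t.length + 1
end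

lemma negSum_nonneg (l : List Int) : 0 ≤ (l.map (fun x => max 0 (-x))).sum := by
  apply List.sum_nonneg; intro x hx
  simp only [List.mem_map] at hx; obtain ⟨y, _, rfl⟩ := hx; exact le_max_left _ _

lemma pvGo_ge (k maxi len : Int) (t : List Int) :
    len * maxi + pvBest k t ≤ pvGo k maxi len t := by
  rw [pvGo.eq_def]
  cases t with
  | nil => simp
  | cons y t2 => dsimp only; split_ifs <;> simp

lemma pvBest_ge (k : Int) (l : List Int) :
    -((l.map (fun x => max 0 (-x))).sum) ≤ pvBest k l := by
  induction l with
  | nil => simp [pvBest]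
  | cons x t ih =>
    have h1 := pvGo_ge k x 1 t
    have h2 : -(max 0 (-x)) ≤ x := by omega
    simp only [pvBest, List.map_cons, List.sum_cons]
    omega

lemma negSum_suffix_le {s t : List Int} (h : s <:+ t) :
    (s.map (fun x => max 0 (-x))).sum ≤ (t.map (fun x => max 0 (-x))).sum := by
  obtain ⟨u, rfl⟩ := h
  have := negSum_nonneg u
  simp only [List.map_append, List.sum_append]
  omega

lemma pvGoA_eq (k : Int) : ∀ (t : List Int) (maxi len ans : Int),
    (∀ s, s <:+ t → pvBestA k s = pvBest k s) →
    pvGoA k maxi len ans t = max ans (pvGo k maxi len t) := by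
  intro t
  induction t with
  | nil => intro maxi len ans hB; rw [pvGoA.eq_def, pvGo.eq_def]; simp [hB [] (List.nil_suffix)]
  | cons y t2 ih =>
    intro maxi len ans hB
    rw [pvGoA.eq_def, pvGo.eq_def]
    have ht : pvBestA k (y :: t2) = pvBest k (y :: t2) := hB _ (List.suffix_refl _)
    dsimp only
    rw [ht]
    split_ifs with hlen
    · rw [ih _ _ _ (fun s hs => hB s (hs.trans (List.suffix_cons y t2)))]
      rw [max_assoc]
    · rfl

lemma pvBestA_eq (k : Int) : ∀ (N : Nat) (l : List Int), l.length ≤ N →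
    (l.map (fun x => max 0 (-x))).sum ≤ 100000000 → pvBestA k l = pvBest k l := by
  intro N
  induction N with
  | zero =>
    intro l hl _
    have : l = [] := List.eq_nil_of_length_eq_zero (Nat.le_zero.mp hl)
    subst this; simp [pvBestA, pvBest]
  | succ N ih =>
    intro l hl hsum
    cases l with
    | nil => simp [pvBestA, pvBest]
    | cons x t =>
      have hB : ∀ s, s <:+ t → pvBestA k s = pvBest k s := by
        intro s hs
        refine ih s ?_ ?_
        · have := hs.length_le; simp at hl; omega
        · have := negSum_suffix_le hs
          have hx : (0 : Int) ≤ max 0 (-x) := le_max_left _ _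
          simp only [List.map_cons, List.sum_cons] at hsum
          omega
      have hxb : max 0 (-x) + (t.map (fun x => max 0 (-x))).sum ≤ 100000000 := by
        simpa using hsum
      have hxs : -100000000 ≤ x := by
        have := negSum_nonneg t; omega
      rw [pvBestA, pvGoA_eq k t _ _ _ hB, max_eq_right hxs]
      have hc : (-100000000 : Int) ≤ pvGo k x 1 t := by
        have h1 := pvGo_ge k x 1 t
        have h2 := pvBest_ge k t
        have h3 : -(max 0 (-x)) ≤ x := by omega
        simp only [List.map_cons, List.sum_cons] at hsum ⊢
        omega
      rw [max_eq_right hc, pvBest]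

-- ===== A-side: the dp array as a spec =====
def dpSpec (arr : List Int) (k : Int) (m : Int) : List Int :=
  (List.range (arr.length + 1)).map (fun (j : Nat) => if m ≤ (j : Int) then pvBestA k (arr.drop j) else 0)

lemma dpSpec_len (arr : List Int) (k m : Int) : (dpSpec arr k m).length = arr.length + 1 := by
  simp [dpSpec]

lemma dpSpec_get (arr : List Int) (k m : Int) (j : Int) (h0 : 0 ≤ j) (hj : j ≤ (arr.length : Int)) :
    PySem.List.pyGetD (dpSpec arr k m) j 0
      = if m ≤ j then pvBestA k (arr.drop j.toNat) else 0 := by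
  rw [PySem.List.pyGetD_eq_getElem _ _ h0 (by rw [dpSpec_len]; push_cast; omega)]
  have hjn : j.toNat < arr.length + 1 := by omega
  simp only [dpSpec, List.getElem_map, List.getElem_range]
  rw [Int.toNat_of_nonneg h0]

lemma dpSpec_init (arr : List Int) (k : Int) :
    List.replicate (arr.length + 1) 0 = dpSpec arr k (arr.length : Int) := by
  apply List.ext_getElem
  · simp [dpSpec_len]
  · intro j h1 h2
    simp only [List.getElem_replicate, dpSpec, List.getElem_map, List.getElem_range]
    rw [dpSpec_len] at h2
    split_ifs with h
    · have : j = arr.length := by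
        simp only [List.length_replicate] at h1; omega
      subst this
      rw [List.drop_length]
      simp [pvBestA]
    · rfl

lemma dpSpec_nonpos (arr : List Int) (k m : Int) (hm : m ≤ 0) :
    dpSpec arr k m = dpSpec arr k 0 := by
  apply List.ext_getElem
  · simp [dpSpec_len]
  · intro j h1 h2
    simp only [dpSpec, List.getElem_map, List.getElem_range]
    have : m ≤ (j : Int) ∧ (0 : Int) ≤ (j : Int) := by constructor <;> omega
    rw [if_pos this.1, if_pos this.2]

lemma dpSpec_set (arr : List Int) (k i : Int) (h0 : 0 ≤ i) (_hilt : i < (arr.length : Int)) :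
    (dpSpec arr k (i + 1)).set i.toNat (pvBestA k (arr.drop i.toNat)) = dpSpec arr k i := by
  apply List.ext_getElem
  · simp [dpSpec_len]
  · intro j h1 h2
    rw [List.length_set, dpSpec_len] at h1
    rw [List.getElem_set]
    simp only [dpSpec, List.getElem_map, List.getElem_range]
    split_ifs with he ho hn ho2 hn2 <;> try rfl
    · subst he; rfl
    · omega
    · omega
    · omega

-- equation-shaped helpers for pvGoA
lemma pvGoA_nil (k maxi len ans : Int) :
    pvGoA k maxi len ans [] = max ans (len * maxi) := by
  rw [pvGoA.eq_def]; simp [pvBestA]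

lemma pvGoA_cons_stop (k maxi len ans y : Int) (t2 : List Int) (h : ¬ len < k) :
    pvGoA k maxi len ans (y :: t2) = max ans (len * maxi + pvBestA k (y :: t2)) := by
  rw [pvGoA.eq_def]; simp [h]

lemma pvGoA_cons_go (k maxi len ans y : Int) (t2 : List Int) (h : len < k) :
    pvGoA k maxi len ans (y :: t2)
      = pvGoA k (max maxi y) (len + 1) (max ans (len * maxi + pvBestA k (y :: t2))) t2 := by
  rw [pvGoA.eq_def]; simp [h]

lemma pvBestA_cons (k x : Int) (t : List Int) :
    pvBestA k (x :: t) = pvGoA k (max (-100000000) x) 1 (-100000000) t := by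
  rw [pvBestA]

lemma innerA (arr : List Int) (k i : Int) (hi : 0 ≤ i) :
    ∀ (c : Nat) (j maxi ans : Int), i ≤ j →
    (min (i + k) (arr.length : Int) - j).toNat = c →
    ((PySem.List.pyRange j (min (i + k) (arr.length : Int)) 1).foldl
      (fun (st : Int × Int × Int) jj =>
        let length := st.1 + 1
        let maxi := max st.2.1 (PySem.List.pyGetD arr jj 0)
        let cost := length * maxi + PySem.List.pyGetD (dpSpec arr k (i + 1)) (jj + 1) 0
        (length, maxi, max st.2.2 cost))
      (j - i, maxi, ans)).2.2
    = if j < min (i + k) (arr.length : Int)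
      then pvGoA k (max maxi (PySem.List.pyGetD arr j 0)) (j - i + 1) ans (arr.drop (j + 1).toNat)
      else ans := by
  intro c
  induction c with
  | zero =>
    intro j maxi ans hij hc
    have he : min (i + k) (arr.length : Int) ≤ j := by omega
    rw [PySem.List.pyRange_one_eq_nil he, List.foldl_nil, if_neg (by omega)]
  | succ c ih =>
    intro j maxi ans hij hc
    have hje : j < min (i + k) (arr.length : Int) := by omega
    have hjn : j < (arr.length : Int) := by omega
    rw [PySem.List.pyRange_one_cons hje, List.foldl_cons]
    simp only
    rw [dpSpec_get arr k (i + 1) (j + 1) (by omega) (by omega), if_pos (by omega)]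
    have hstate : j - i + 1 = (j + 1) - i := by ring
    rw [hstate]
    rw [ih (j + 1) (max maxi (PySem.List.pyGetD arr j 0))
        (max ans (((j + 1) - i) * max maxi (PySem.List.pyGetD arr j 0) + pvBestA k (arr.drop (j + 1).toNat)))
        (by omega) (by omega)]
    rw [if_pos hje, ← hstate]
    by_cases hlt : j + 1 < min (i + k) (arr.length : Int)
    · have hn1 : (j + 1).toNat < arr.length := by omega
      have hdrop : arr.drop (j + 1).toNat = arr[(j + 1).toNat] :: arr.drop ((j + 1).toNat + 1) :=
        List.drop_eq_getElem_cons hn1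
      rw [if_pos hlt]
      conv_rhs => rw [hdrop]
      rw [pvGoA_cons_go _ _ _ _ _ _ (show j - i + 1 < k by omega), ← hdrop]
      rw [PySem.List.pyGetD_eq_getElem arr 0 (show (0:Int) ≤ j + 1 by omega) (by omega)]
      have hnat : (j + 1 + 1).toNat = (j + 1).toNat + 1 := by omega
      rw [hnat]
    · rw [if_neg hlt]
      by_cases hend : arr.length ≤ (j + 1).toNat
      · rw [List.drop_eq_nil_of_le hend, pvGoA_nil]
        simp [pvBestA]
      · have hn1 : (j + 1).toNat < arr.length := by omega
        have hdrop : arr.drop (j + 1).toNat = arr[(j + 1).toNat] :: arr.drop ((j + 1).toNat + 1) :=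
          List.drop_eq_getElem_cons hn1
        conv_rhs => rw [hdrop]
        rw [pvGoA_cons_stop _ _ _ _ _ _ (show ¬ j - i + 1 < k by omega), ← hdrop]

lemma outerA (arr : List Int) (k : Int) (hk : 1 ≤ k) :
    ∀ (c : Nat) (j : Int), j ≤ (arr.length : Int) - 1 → (j + 1).toNat = c →
    (PySem.List.pyRange j (-1) (-1)).foldl
      (fun dp i =>
        let st := (PySem.List.pyRange i (min (i + k) (arr.length : Int)) 1).foldl
          (fun (st : Int × Int × Int) jj =>
            let length := st.1 + 1
            let maxi := max st.2.1 (PySem.List.pyGetD arr jj 0)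
            let cost := length * maxi + PySem.List.pyGetD dp (jj + 1) 0
            (length, maxi, max st.2.2 cost))
          (0, -100000000, -100000000)
        dp.set i.toNat st.2.2)
      (dpSpec arr k (j + 1))
    = dpSpec arr k 0 := by
  intro c
  induction c with
  | zero =>
    intro j hj hc
    rw [PySem.List.pyRange_neg_one_eq_nil (by omega), List.foldl_nil]
    exact dpSpec_nonpos arr k (j + 1) (by omega)
  | succ c ih =>
    intro j hj hc
    have hj0 : 0 ≤ j := by omega
    have hjn : j < (arr.length : Int) := by omega
    rw [PySem.List.pyRange_neg_one_cons (by omega), List.foldl_cons]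
    simp only
    have hinner := innerA arr k j hj0 (min (j + k) (arr.length : Int) - j).toNat j
      (-100000000) (-100000000) le_rfl rfl
    rw [show j - j = (0 : Int) by omega] at hinner
    rw [if_pos (by omega)] at hinner
    have hn1 : j.toNat < arr.length := by omega
    have hdropj : arr.drop j.toNat = arr[j.toNat] :: arr.drop (j.toNat + 1) :=
      List.drop_eq_getElem_cons hn1
    rw [PySem.List.pyGetD_eq_getElem arr 0 hj0 (by omega),
        show (0 : Int) + 1 = 1 by ring,
        show (j + 1).toNat = j.toNat + 1 by omega, ← pvBestA_cons, ← hdropj] at hinner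
    rw [hinner, dpSpec_set arr k j hj0 hjn]
    have := ih (j - 1) (by omega) (by omega)
    rw [show j - 1 + 1 = j by ring] at this
    exact this

lemma portA_eq (arr : List Int) (k : Int) (hk : 1 ≤ k) :
    maxSumAfterPartitioning arr k = pvBestA k arr := by
  simp only [maxSumAfterPartitioning, Int.toNat_natCast]
  rw [dpSpec_init arr k]
  have hout := outerA arr k hk ((arr.length : Int) - 1 + 1).toNat ((arr.length : Int) - 1)
    (by omega) rfl
  rw [show (arr.length : Int) - 1 + 1 = (arr.length : Int) by ring] at hout
  rw [hout]
  rw [dpSpec_get arr k 0 0 le_rfl (by positivity)]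
  simp

lemma portA_nil (k : Int) : maxSumAfterPartitioning [] k = 0 := by
  simp [maxSumAfterPartitioning, PySem.List.pyRange_neg_one_eq_nil, PySem.List.pyGetD_zero]

-- ===== B-side: the memo dict and stack as specs =====
def memoSpec (arr : List Int) (k : Int) (m : Nat) : PySem.Dict Int Int :=
  if arr.length ≤ m then PySem.Dict.empty.insert (arr.length : Int) 0
  else (memoSpec arr k (m + 1)).insert (m : Int) (pvBest k (arr.drop m))
  termination_by arr.length - m

def stk : Nat → List Int
  | 0 => []
  | m + 1 => (m : Int) :: stk m

lemma ite_gt_eq_max (a b : Int) : (if b > a then b else a) = max a b := by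
  rw [max_def]; split_ifs <;> omega

lemma memoSpec_get? (arr : List Int) (k : Int) : ∀ (c m : Nat), arr.length - m = c → ∀ (j : Int),
    (memoSpec arr k m).get? j
      = if (min m arr.length : Int) ≤ j ∧ j ≤ (arr.length : Int)
        then some (pvBest k (arr.drop j.toNat)) else none := by
  intro c
  induction c with
  | zero =>
    intro m hm j
    rw [memoSpec, if_pos (by omega)]
    rw [PySem.Dict.get?_insert, PySem.Dict.get?_empty]
    split_ifs with h1 h2 h2
    · subst h1
      have : ((arr.length : Int)).toNat = arr.length := by omega
      rw [this, List.drop_length]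
      simp [pvBest]
    · exfalso; omega
    · exfalso
      have hmin : (min m arr.length : Int) = (arr.length : Int) := by
        omega
      omega
    · rfl
  | succ c ih =>
    intro m hm j
    have hmn : m < arr.length := by omega
    rw [memoSpec, if_neg (by omega)]
    rw [PySem.Dict.get?_insert, ih (m + 1) (by omega) j]
    push_cast
    have hmin1 : min ((m : Int) + 1) (arr.length : Int) = (m : Int) + 1 := by omega
    have hmin0 : min (m : Int) (arr.length : Int) = (m : Int) := by omega
    rw [hmin1, hmin0]
    split_ifs with h1 h2 h2 h2 h2 <;>
      first
        | rfl
        | (subst h1; rw [show ((m : Int)).toNat = m by omega])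
        | (exfalso; omega)

lemma memoSpec_getD (arr : List Int) (k : Int) (m : Nat) (j : Int)
    (h1 : (min m arr.length : Int) ≤ j) (h2 : j ≤ (arr.length : Int)) :
    (memoSpec arr k m).getD j 0 = pvBest k (arr.drop j.toNat) := by
  rw [PySem.Dict.getD_eq_get?_getD, memoSpec_get? arr k (arr.length - m) m rfl j,
      if_pos ⟨h1, h2⟩]
  rfl

lemma memoSpec_contains (arr : List Int) (k : Int) (m : Nat) (j : Int) :
    (memoSpec arr k m).contains j
      = decide ((min m arr.length : Int) ≤ j ∧ j ≤ (arr.length : Int)) := by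
  rw [PySem.Dict.contains_eq_isSome_get?, memoSpec_get? arr k (arr.length - m) m rfl j]
  split_ifs with h
  · rw [decide_eq_true h]; rfl
  · rw [decide_eq_false h]; rfl

-- B's inner scan computes pvGo (the running best absorbs every candidate already seen).
lemma innerB (arr : List Int) (k i : Int) (hi : 0 ≤ i) (memo : PySem.Dict Int Int)
    (hmem : ∀ j : Int, i + 1 ≤ j → j ≤ (arr.length : Int) →
      memo.getD j 0 = pvBest k (arr.drop j.toNat)) :
    ∀ (c : Nat) (j maxi best : Int), i + 1 ≤ j →
    (min (i + k) (arr.length : Int) - j).toNat = c →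
    (j - i) * maxi + pvBest k (arr.drop j.toNat) ≤ best →
    ((PySem.List.pyRange j (min (i + k) (arr.length : Int)) 1).foldl
      (fun (s : Int × Int) jj =>
        let v := PySem.List.pyGetD arr jj 0
        let runmax := if v > s.1 then v else s.1
        let c := (jj - i + 1) * runmax + memo.getD (jj + 1) 0
        (runmax, if c > s.2 then c else s.2))
      (maxi, best)).2
    = max best (pvGo k maxi (j - i) (arr.drop j.toNat)) := by
  intro c
  induction c with
  | zero =>
    intro j maxi best hij hc hbest
    have he : min (i + k) (arr.length : Int) ≤ j := by omega
    rw [PySem.List.pyRange_one_eq_nil he, List.foldl_nil]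
    have hle : pvGo k maxi (j - i) (arr.drop j.toNat) ≤ best := by
      rw [pvGo.eq_def]
      cases hdrop : arr.drop j.toNat with
      | nil => rw [hdrop] at hbest; simpa [pvBest] using hbest
      | cons y t2 =>
        have hjlt : j.toNat < arr.length := by
          by_contra hge
          rw [List.drop_eq_nil_of_le (by omega)] at hdrop
          simp at hdrop
        have hnk : ¬ (j - i < k) := by omega
        rw [hdrop] at hbest
        simpa [hnk] using hbest
    omega
  | succ c ih =>
    intro j maxi best hij hc hbest
    have hje : j < min (i + k) (arr.length : Int) := by omega
    have hjn : j < (arr.length : Int) := by omega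
    rw [PySem.List.pyRange_one_cons hje, List.foldl_cons]
    simp only
    have hget : PySem.List.pyGetD arr j 0 = arr[j.toNat] :=
      PySem.List.pyGetD_eq_getElem arr 0 (by omega) (by omega)
    have hdrop : arr.drop j.toNat = arr[j.toNat] :: arr.drop (j.toNat + 1) :=
      List.drop_eq_getElem_cons (by omega)
    rw [hget, ite_gt_eq_max, hmem (j + 1) (by omega) (by omega)]
    rw [ite_gt_eq_max]
    have hnat : (j + 1).toNat = j.toNat + 1 := by omega
    have hIH := ih (j + 1) (max maxi arr[j.toNat])
      (max best ((j - i + 1) * max maxi arr[j.toNat] + pvBest k (arr.drop (j + 1).toNat)))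
      (by omega) (by omega)
      (by rw [show j + 1 - i = j - i + 1 by ring]; omega)
    rw [hIH]
    have hgo : pvGo k maxi (j - i) (arr.drop j.toNat)
        = max ((j - i) * maxi + pvBest k (arr.drop j.toNat))
            (pvGo k (max maxi arr[j.toNat]) (j - i + 1) (arr.drop (j + 1).toNat)) := by
      conv_lhs => rw [hdrop, pvGo.eq_def]
      simp only
      rw [if_pos (show j - i < k by omega), ← hdrop, hnat]
    have hgec : (j - i + 1) * max maxi arr[j.toNat] + pvBest k (arr.drop (j + 1).toNat)
        ≤ pvGo k (max maxi arr[j.toNat]) (j - i + 1) (arr.drop (j + 1).toNat) := by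
      have := pvGo_ge k (max maxi arr[j.toNat]) (j - i + 1) (arr.drop (j + 1).toNat)
      omega
    rw [show j + 1 - i = j - i + 1 by ring] at *
    omega

-- One compute step: with memo = memoSpec (m+1) and m on top, the loop body stores pvBest (drop m).
lemma bLoop_compute (arr : List Int) (k : Int) : ∀ (m fuel : Nat), m ≤ arr.length → m ≤ fuel →
    bLoop arr k (arr.length : Int) fuel (stk m) (memoSpec arr k m) = memoSpec arr k 0 := by
  intro m
  induction m with
  | zero =>
    intro fuel _ _
    cases fuel <;> rfl
  | succ m ih =>
    intro fuel hm hfuel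
    obtain ⟨f, rfl⟩ : ∃ f, fuel = f + 1 := ⟨fuel - 1, by omega⟩
    rw [stk, bLoop]
    rw [memoSpec_contains arr k (m + 1) (m : Int),
        memoSpec_contains arr k (m + 1) ((m : Int) + 1)]
    have hc1 : decide (min (((m + 1 : ℕ)) : ℤ) (arr.length : ℤ) ≤ (m : ℤ) ∧ (m : ℤ) ≤ (arr.length : ℤ)) = false := by
      simp only [decide_eq_false_iff_not]
      push_cast
      omega
    have hc2 : decide (min (((m + 1 : ℕ)) : ℤ) (arr.length : ℤ) ≤ (m : ℤ) + 1 ∧ (m : ℤ) + 1 ≤ (arr.length : ℤ)) = true := by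
      simp only [decide_eq_true_eq]
      push_cast
      omega
    rw [hc1, hc2]
    simp only [Bool.false_eq_true, if_false]
    have hmn : m < arr.length := by omega
    have hget : PySem.List.pyGetD arr (m : Int) 0 = arr[m] := by
      rw [PySem.List.pyGetD_eq_getElem arr 0 (by omega) (by omega)]
      congr 1
    have hmemD : (memoSpec arr k (m + 1)).getD ((m : Int) + 1) 0 = pvBest k (arr.drop (m + 1)) := by
      rw [memoSpec_getD arr k (m + 1) ((m : Int) + 1) (by omega) (by omega)]
      congr 1
    rw [hget, hmemD]
    have hdropm : arr.drop m = arr[m] :: arr.drop (m + 1) := List.drop_eq_getElem_cons hmn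
    have hinner := innerB arr k (m : Int) (by omega) (memoSpec arr k (m + 1))
      (fun j hj1 hj2 => by
        refine memoSpec_getD arr k (m + 1) j ?_ hj2
        have : (min (m + 1) arr.length : Int) = ((m : Int) + 1) := by omega
        omega)
      (min ((m : Int) + k) (arr.length : Int) - ((m : Int) + 1)).toNat
      ((m : Int) + 1) arr[m] (arr[m] + pvBest k (arr.drop (m + 1)))
      (by omega) rfl
      (by rw [show (m : Int) + 1 - (m : Int) = 1 by ring,
              show ((m : Int) + 1).toNat = m + 1 by omega]; omega)
    rw [show ((m : Int) + 1).toNat = m + 1 by omega,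
        show (m : Int) + 1 - (m : Int) = 1 by ring] at hinner
    rw [hinner]
    have hge' : arr[m] + pvBest k (arr.drop (m + 1)) ≤ pvGo k arr[m] 1 (arr.drop (m + 1)) := by
      have := pvGo_ge k arr[m] 1 (arr.drop (m + 1)); omega
    have hpb : pvBest k (arr.drop m) = pvGo k arr[m] 1 (arr.drop (m + 1)) := by
      rw [hdropm, pvBest]
    have hbest : max (arr[m] + pvBest k (arr.drop (m + 1))) (pvGo k arr[m] 1 (arr.drop (m + 1)))
        = pvBest k (arr.drop m) := by
      rw [hpb]; exact max_eq_right hge'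
    rw [hbest]
    have hins : (memoSpec arr k (m + 1)).insert (m : Int) (pvBest k (arr.drop m)) = memoSpec arr k m := by
      conv_rhs => rw [memoSpec]
      rw [if_neg (by omega)]
    rw [hins]
    exact ih f (by omega) (by omega)

-- Descent phase: missing dependencies are pushed until the deepest index n-1 is on top.
lemma bLoop_descent (arr : List Int) (k : Int) : ∀ (d m fuel : Nat), 1 ≤ m → m + d = arr.length →
    d + arr.length ≤ fuel →
    bLoop arr k (arr.length : Int) fuel (stk m) (memoSpec arr k arr.length) = memoSpec arr k 0 := by
  intro d
  induction d with
  | zero =>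
    intro m fuel h1 hm hfuel
    have : m = arr.length := by omega
    subst this
    exact bLoop_compute arr k arr.length fuel le_rfl (by omega)
  | succ d ih =>
    intro m fuel h1 hm hfuel
    obtain ⟨m', rfl⟩ : ∃ m', m = m' + 1 := ⟨m - 1, by omega⟩
    obtain ⟨f, rfl⟩ : ∃ f, fuel = f + 1 := ⟨fuel - 1, by omega⟩
    rw [stk, bLoop]
    rw [memoSpec_contains arr k arr.length (m' : Int),
        memoSpec_contains arr k arr.length ((m' : Int) + 1)]
    have hmn : m' + 1 < arr.length := by omega
    have hc1 : decide ((min arr.length arr.length : Int) ≤ (m' : Int) ∧ (m' : Int) ≤ (arr.length : Int)) = false := by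
      simp only [decide_eq_false_iff_not]; omega
    have hc2 : decide ((min arr.length arr.length : Int) ≤ (m' : Int) + 1 ∧ (m' : Int) + 1 ≤ (arr.length : Int)) = false := by
      simp only [decide_eq_false_iff_not]; omega
    rw [hc1, hc2]
    simp only [Bool.false_eq_true, if_false, if_true]
    have hstk : ((m' : Int) + 1) :: (m' : Int) :: stk m' = stk (m' + 2) := by
      rw [stk, stk]; push_cast; ring_nf
    rw [hstk]
    exact ih (m' + 2) f (by omega) (by omega) (by omega)

lemma portB_eq (arr : List Int) (k : Int) :
    maxSumAfterPartitioning_alt arr k = pvBest k arr := by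
  have hinit : PySem.Dict.empty.insert ((arr.length : Nat) : Int) 0 = memoSpec arr k arr.length := by
    rw [memoSpec.eq_def, if_pos le_rfl]
  show (bLoop arr k (arr.length : Int) (2 * arr.length + 1) [0]
      (PySem.Dict.empty.insert (arr.length : Int) 0)).getD 0 0 = pvBest k arr
  rw [hinit]
  cases harr : arr with
  | nil =>
    subst harr
    simp only [List.length_nil, Nat.cast_zero]
    rw [show (2 * 0 + 1 : ℕ) = 0 + 1 from rfl, bLoop]
    rw [memoSpec_contains [] k 0 (0 : Int)]
    simp only [List.length_nil, Nat.cast_zero, min_self, le_refl, and_self, decide_true, if_true]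
    rw [show bLoop [] k 0 0 [] (memoSpec [] k 0) = memoSpec [] k 0 from rfl]
    rw [memoSpec_getD [] k 0 0 (by simp) (by simp)]
    simp [pvBest]
  | cons x t =>
    rw [← harr]
    have hn : 1 ≤ arr.length := by rw [harr]; simp
    have h01 : ([0] : List Int) = stk 1 := by rw [stk, stk]; norm_num
    rw [h01, bLoop_descent arr k (arr.length - 1) 1 (2 * arr.length + 1) le_rfl (by omega) (by omega)]
    rw [memoSpec_getD arr k 0 0 (by simp) (by positivity)]
    simp

lemma portB_nil (k : Int) : maxSumAfterPartitioning_alt [] k = 0 := by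
  rw [portB_eq]; simp [pvBest]

-- ===== VERDICT (by name: the statement is the Claim_ definition above) =====
theorem maxSumAfterPartitioning_spec : Claim_equal_maxSumAfterPartitioning := by
  intro arr k _ hpre
  obtain ⟨hor, hsum⟩ := hpre
  unfold Spec_maxSumAfterPartitioning
  rcases hor with hk | hnil
  · rw [portA_eq arr k hk, portB_eq arr k, pvBestA_eq k arr.length arr le_rfl hsum]
  · subst hnil
    rw [portA_nil, portB_nil]
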